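-- pv_equiv track=rewrite | github.com/MahmoudKebbi/programmable-matter-RL-2.0 | src/old_curriculum/curriculum.py | get_shape_coords
-- ===== SOURCE A (Python) =====
-- from typing import List, Tuple, Dict
--
-- def get_shape_coords(
--     shape_type: str, start_x: int, start_y: int
-- ) -> List[Tuple[int, int]]:
--     """Get coordinates for a specific shape at given position."""
--     coords = []
--
--     # Simple shapes
--     if shape_type == "square":
--         coords = [
--             (start_x, start_y),
--             (start_x, start_y + 1),
--             (start_x + 1, start_y),
--             (start_x + 1, start_y + 1),
--         ]
--     elif shape_type == "line_h":
--         coords = [(start_x, start_y + i) for i in range(3)]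
--     elif shape_type == "line_v":
--         coords = [(start_x + i, start_y) for i in range(3)]
--     elif shape_type == "l_shape":
--         coords = [
--             (start_x, start_y),
--             (start_x + 1, start_y),
--             (start_x + 1, start_y + 1),
--         ]
--
--     # Medium shapes
--     elif shape_type == "t_shape":
--         coords = [
--             (start_x, start_y + 1),
--             (start_x + 1, start_y),
--             (start_x + 1, start_y + 1),
--             (start_x + 1, start_y + 2),
--         ]
--     elif shape_type == "z_shape":
--         coords = [
--             (start_x, start_y),
--             (start_x, start_y + 1),
--             (start_x + 1, start_y + 1),
--             (start_x + 1, start_y + 2),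
--         ]
--     elif shape_type == "plus":
--         coords = [
--             (start_x, start_y + 1),
--             (start_x + 1, start_y),
--             (start_x + 1, start_y + 1),
--             (start_x + 1, start_y + 2),
--             (start_x + 2, start_y + 1),
--         ]
--     elif shape_type == "u_shape":
--         coords = [
--             (start_x, start_y),
--             (start_x, start_y + 2),
--             (start_x + 1, start_y),
--             (start_x + 1, start_y + 1),
--             (start_x + 1, start_y + 2),
--         ]
--
--     # Complex shapes
--     elif shape_type == "h_shape":
--         coords = [
--             (start_x, start_y),
--             (start_x, start_y + 2),
--             (start_x + 1, start_y),
--             (start_x + 1, start_y + 1),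
--             (start_x + 1, start_y + 2),
--             (start_x + 2, start_y),
--             (start_x + 2, start_y + 2),
--         ]
--     elif shape_type == "stairs":
--         coords = [
--             (start_x, start_y),
--             (start_x, start_y + 1),
--             (start_x + 1, start_y + 1),
--             (start_x + 1, start_y + 2),
--             (start_x + 2, start_y + 2),
--         ]
--     elif shape_type == "cross":
--         coords = [
--             (start_x, start_y + 1),
--             (start_x + 1, start_y),
--             (start_x + 1, start_y + 1),
--             (start_x + 1, start_y + 2),
--             (start_x + 2, start_y + 1),
--         ]
--
--     return coords
-- ===== SOURCE B (Python) =====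
-- # Each shape encoded as a 9-bit occupancy mask of a 3x3 grid (bit dx*3+dy set
-- # iff cell (dx,dy) belongs to the shape).  All of A's shapes list their cells
-- # in row-major order, so decoding the mask row-major reproduces A exactly.
-- _SHAPE_MASKS = {
--     "square":  0b000011011,
--     "line_h":  0b000000111,
--     "line_v":  0b001001001,
--     "l_shape": 0b000011001,
--     "t_shape": 0b000111010,
--     "z_shape": 0b000110011,
--     "plus":    0b010111010,
--     "u_shape": 0b000111101,
--     "h_shape": 0b101111101,
--     "stairs":  0b100110011,
--     "cross":   0b010111010,
-- }
--
-- def get_shape_coords(shape_type, start_x, start_y):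
--     """Get coordinates for a specific shape at given position."""
--     mask = _SHAPE_MASKS.get(shape_type, 0)
--     return [(start_x + i // 3, start_y + i % 3)
--             for i in range(9) if (mask >> i) & 1]
-- ===== Notes on version B (the rewrite author's own statement) =====
-- stated objective: alternative
-- what changed: Replaced the 11-branch cascade of hard-coded absolute coordinate lists with a 9-bit 3x3 occupancy bitmask per shape, decoded by one uniform row-major scan (bit i -> cell (i//3, i%3) translated by the start point); correct because every shape in A lists its cells in row-major order.
import Mathlib
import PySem

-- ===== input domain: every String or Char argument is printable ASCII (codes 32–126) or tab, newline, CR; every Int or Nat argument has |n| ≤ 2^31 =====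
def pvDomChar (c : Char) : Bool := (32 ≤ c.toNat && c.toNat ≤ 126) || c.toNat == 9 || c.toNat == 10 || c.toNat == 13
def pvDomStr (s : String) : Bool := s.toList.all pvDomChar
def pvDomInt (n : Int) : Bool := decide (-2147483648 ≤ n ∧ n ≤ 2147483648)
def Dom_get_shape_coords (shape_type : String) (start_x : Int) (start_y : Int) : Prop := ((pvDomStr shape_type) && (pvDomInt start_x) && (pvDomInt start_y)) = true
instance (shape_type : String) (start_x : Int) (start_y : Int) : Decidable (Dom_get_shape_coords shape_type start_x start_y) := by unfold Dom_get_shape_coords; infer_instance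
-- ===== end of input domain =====

-- B replaces A's 11-branch cascade of absolute coordinate lists with a 9-bit 3x3 occupancy
-- bitmask per shape, decoded by one uniform row-major scan (objective: alternative; same cost).

-- ===== PORT A =====
def get_shape_coords (shape_type : String) (start_x : Int) (start_y : Int) : List (Int × Int) :=
  if shape_type = "square" then
    [(start_x, start_y), (start_x, start_y + 1), (start_x + 1, start_y), (start_x + 1, start_y + 1)]
  else if shape_type = "line_h" then
    (PySem.List.pyRange 0 3 1).map (fun i => (start_x, start_y + i))
  else if shape_type = "line_v" then
    (PySem.List.pyRange 0 3 1).map (fun i => (start_x + i, start_y))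
  else if shape_type = "l_shape" then
    [(start_x, start_y), (start_x + 1, start_y), (start_x + 1, start_y + 1)]
  else if shape_type = "t_shape" then
    [(start_x, start_y + 1), (start_x + 1, start_y), (start_x + 1, start_y + 1), (start_x + 1, start_y + 2)]
  else if shape_type = "z_shape" then
    [(start_x, start_y), (start_x, start_y + 1), (start_x + 1, start_y + 1), (start_x + 1, start_y + 2)]
  else if shape_type = "plus" then
    [(start_x, start_y + 1), (start_x + 1, start_y), (start_x + 1, start_y + 1), (start_x + 1, start_y + 2), (start_x + 2, start_y + 1)]
  else if shape_type = "u_shape" then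
    [(start_x, start_y), (start_x, start_y + 2), (start_x + 1, start_y), (start_x + 1, start_y + 1), (start_x + 1, start_y + 2)]
  else if shape_type = "h_shape" then
    [(start_x, start_y), (start_x, start_y + 2), (start_x + 1, start_y), (start_x + 1, start_y + 1), (start_x + 1, start_y + 2), (start_x + 2, start_y), (start_x + 2, start_y + 2)]
  else if shape_type = "stairs" then
    [(start_x, start_y), (start_x, start_y + 1), (start_x + 1, start_y + 1), (start_x + 1, start_y + 2), (start_x + 2, start_y + 2)]
  else if shape_type = "cross" then
    [(start_x, start_y + 1), (start_x + 1, start_y), (start_x + 1, start_y + 1), (start_x + 1, start_y + 2), (start_x + 2, start_y + 1)]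
  else
    []

-- ===== PORT B =====
-- 9-bit occupancy mask of a 3x3 grid: bit dx*3+dy is set iff cell (dx,dy) is in the shape.
def shapeMasks : PySem.Dict String Int :=
  PySem.Dict.ofList
    [ ("square",  27), ("line_h", 7), ("line_v", 73), ("l_shape", 25),
      ("t_shape", 58), ("z_shape", 51), ("plus", 186), ("u_shape", 61),
      ("h_shape", 381), ("stairs", 307), ("cross", 186) ]

def get_shape_coords_alt (shape_type : String) (start_x : Int) (start_y : Int) : List (Int × Int) :=
  let mask := PySem.Dict.getD shapeMasks shape_type 0
  ((PySem.List.pyRange 0 9 1).filter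
      (fun i => (mask >>> i.toNat) % 2 = 1)).map   -- (mask >> i) & 1, exact here: 0 ≤ mask, 0 ≤ i
    (fun i => (start_x + PySem.Int.floordiv i 3, start_y + PySem.Int.mod i 3))

-- ===== PRECONDITION & SPEC =====
def Spec_get_shape_coords (shape_type : String) (start_x : Int) (start_y : Int) (out : List (Int × Int)) : Prop := out = get_shape_coords_alt shape_type start_x start_y
instance (shape_type : String) (start_x : Int) (start_y : Int) (out : List (Int × Int)) : Decidable (Spec_get_shape_coords shape_type start_x start_y out) := by unfold Spec_get_shape_coords; infer_instance

-- ===== CLAIM =====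
def Claim_equal_get_shape_coords : Prop := ∀ (shape_type : String) (start_x : Int) (start_y : Int), Dom_get_shape_coords shape_type start_x start_y → Spec_get_shape_coords shape_type start_x start_y (get_shape_coords shape_type start_x start_y)

-- ===== LEMMAS AND PROOFS =====
theorem shapeMasks_mk : shapeMasks = PySem.Dict.mk
    [ ("square",  27), ("line_h", 7), ("line_v", 73), ("l_shape", 25),
      ("t_shape", 58), ("z_shape", 51), ("plus", 186), ("u_shape", 61),
      ("h_shape", 381), ("stairs", 307), ("cross", 186) ] := by decide

-- B applied to a known shape name: the mask filter evaluates to the shape's row-major index list.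
theorem filt_square : ((PySem.List.pyRange 0 9 1).filter
    (fun i => ((PySem.Dict.getD shapeMasks "square" 0) >>> i.toNat) % 2 = 1)) = [(0 : Int), (1 : Int), (3 : Int), (4 : Int)] := by decide
theorem filt_line_h : ((PySem.List.pyRange 0 9 1).filter
    (fun i => ((PySem.Dict.getD shapeMasks "line_h" 0) >>> i.toNat) % 2 = 1)) = [(0 : Int), (1 : Int), (2 : Int)] := by decide
theorem filt_line_v : ((PySem.List.pyRange 0 9 1).filter
    (fun i => ((PySem.Dict.getD shapeMasks "line_v" 0) >>> i.toNat) % 2 = 1)) = [(0 : Int), (3 : Int), (6 : Int)] := by decide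
theorem filt_l_shape : ((PySem.List.pyRange 0 9 1).filter
    (fun i => ((PySem.Dict.getD shapeMasks "l_shape" 0) >>> i.toNat) % 2 = 1)) = [(0 : Int), (3 : Int), (4 : Int)] := by decide
theorem filt_t_shape : ((PySem.List.pyRange 0 9 1).filter
    (fun i => ((PySem.Dict.getD shapeMasks "t_shape" 0) >>> i.toNat) % 2 = 1)) = [(1 : Int), (3 : Int), (4 : Int), (5 : Int)] := by decide
theorem filt_z_shape : ((PySem.List.pyRange 0 9 1).filter
    (fun i => ((PySem.Dict.getD shapeMasks "z_shape" 0) >>> i.toNat) % 2 = 1)) = [(0 : Int), (1 : Int), (4 : Int), (5 : Int)] := by decide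
theorem filt_plus : ((PySem.List.pyRange 0 9 1).filter
    (fun i => ((PySem.Dict.getD shapeMasks "plus" 0) >>> i.toNat) % 2 = 1)) = [(1 : Int), (3 : Int), (4 : Int), (5 : Int), (7 : Int)] := by decide
theorem filt_u_shape : ((PySem.List.pyRange 0 9 1).filter
    (fun i => ((PySem.Dict.getD shapeMasks "u_shape" 0) >>> i.toNat) % 2 = 1)) = [(0 : Int), (2 : Int), (3 : Int), (4 : Int), (5 : Int)] := by decide
theorem filt_h_shape : ((PySem.List.pyRange 0 9 1).filter
    (fun i => ((PySem.Dict.getD shapeMasks "h_shape" 0) >>> i.toNat) % 2 = 1)) = [(0 : Int), (2 : Int), (3 : Int), (4 : Int), (5 : Int), (6 : Int), (8 : Int)] := by decide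
theorem filt_stairs : ((PySem.List.pyRange 0 9 1).filter
    (fun i => ((PySem.Dict.getD shapeMasks "stairs" 0) >>> i.toNat) % 2 = 1)) = [(0 : Int), (1 : Int), (4 : Int), (5 : Int), (8 : Int)] := by decide
theorem filt_cross : ((PySem.List.pyRange 0 9 1).filter
    (fun i => ((PySem.Dict.getD shapeMasks "cross" 0) >>> i.toNat) % 2 = 1)) = [(1 : Int), (3 : Int), (4 : Int), (5 : Int), (7 : Int)] := by decide

-- ===== VERDICT =====
set_option maxHeartbeats 1000000 in
theorem get_shape_coords_spec : Claim_equal_get_shape_coords := by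
  intro s x y _
  unfold Spec_get_shape_coords get_shape_coords
  split_ifs with h1 h2 h3 h4 h5 h6 h7 h8 h9 h10 h11
  · subst h1
    simp only [get_shape_coords_alt]
    rw [filt_square]
    simp
  · subst h2
    simp only [get_shape_coords_alt]
    rw [filt_line_h]
    simp [PySem.List.pyRange, List.range_succ]
  · subst h3
    simp only [get_shape_coords_alt]
    rw [filt_line_v]
    simp [PySem.List.pyRange, List.range_succ]
  · subst h4
    simp only [get_shape_coords_alt]
    rw [filt_l_shape]
    simp
  · subst h5
    simp only [get_shape_coords_alt]
    rw [filt_t_shape]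
    simp
  · subst h6
    simp only [get_shape_coords_alt]
    rw [filt_z_shape]
    simp
  · subst h7
    simp only [get_shape_coords_alt]
    rw [filt_plus]
    simp
  · subst h8
    simp only [get_shape_coords_alt]
    rw [filt_u_shape]
    simp
  · subst h9
    simp only [get_shape_coords_alt]
    rw [filt_h_shape]
    simp
  · subst h10
    simp only [get_shape_coords_alt]
    rw [filt_stairs]
    simp
  · subst h11
    simp only [get_shape_coords_alt]
    rw [filt_cross]
    simp
  · -- unknown shape: the lookup defaults to mask 0, which decodes to []
    simp only [get_shape_coords_alt]
    have hm : PySem.Dict.getD shapeMasks s 0 = 0 := by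
      rw [shapeMasks_mk]
      simp [PySem.Dict.getD, PySem.Dict.get?,
        Ne.symm h1, Ne.symm h2, Ne.symm h3, Ne.symm h4, Ne.symm h5, Ne.symm h6,
        Ne.symm h7, Ne.symm h8, Ne.symm h9, Ne.symm h10, Ne.symm h11]
    rw [hm, show ((PySem.List.pyRange 0 9 1).filter
        (fun i => ((0 : Int) >>> i.toNat) % 2 = 1)) = [] from by decide]
    simp
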